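-- pv_equiv track=rewrite | github.com/Ultimagen/VariantCalling | ugvc/joint/compress_gvcf.py | get_compressed_pl_into_3_values
-- ===== SOURCE A (Python) =====
-- def get_compressed_pl_into_3_values(pl: tuple):
--     '''
--     PL is tuple which its size is decided by the number of alts.
--     This function makes it a 3 tuple for the merged record in the following manner:
--     The input PL is of the form of
--     (0,0),(0,1)(1,1),(0,2),(1,2),(2,2),(0,3),(1,3),(2,3),(3,3)..
--     so this function makes a 3 tuple by:
--     so this function makes a 3 tuple by:
--     ((0,0), min((0,1),(0,2),(0,3)..),min(all the others which are not 0/*)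
--     Parameters
--     ----------
--     pl
--
--     Returns
--     -------
--     3-values tuple
--     '''
--     if len(pl) == 3:
--         return pl
--     else:
--         compressed_pl = []
--         n = 0
--         sum_n = 0
--         while sum_n < len(pl):
--             cur_compressed_pl = pl[sum_n:sum_n + n + 1]
--             n += 1
--             sum_n += n
--             for i in range(len(cur_compressed_pl)):
--                 if i + 1 >= len(compressed_pl) and i <= 1:
--                     compressed_pl.append(cur_compressed_pl[i])
--                 else:
--                     compressed_pl[min(i + 1, 2)] = min(compressed_pl[min(i + 1, 2)], cur_compressed_pl[i])
--         return tuple(compressed_pl)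
-- ===== SOURCE B (Python) =====
-- def get_compressed_pl_into_3_values(pl: tuple):
--     # Classify each flat index directly: index 0 -> first slot; triangular
--     # starts 1,3,6,10,... -> "first column" bucket; everything else -> third bucket.
--     if not pl:
--         return ()
--     p1 = []
--     p2 = []
--     tri = 1
--     step = 2
--     for i in range(1, len(pl)):
--         if i == tri:
--             p1.append(pl[i])
--             tri += step
--             step += 1
--         else:
--             p2.append(pl[i])
--     out = [pl[0]]
--     if p1:
--         out.append(min(p1))
--     if p2:
--         out.append(min(p2))
--     return tuple(out)
-- ===== Notes on version B (the rewrite author's own statement) =====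
-- stated objective: simpler
-- what changed: A reconstructs triangular rows with a nested while/for loop that slices pl and mutates a 3-slot list in place; B does one flat pass classifying each index by a running triangular counter into two bucket lists and takes builtin mins at the end.
import Mathlib
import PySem

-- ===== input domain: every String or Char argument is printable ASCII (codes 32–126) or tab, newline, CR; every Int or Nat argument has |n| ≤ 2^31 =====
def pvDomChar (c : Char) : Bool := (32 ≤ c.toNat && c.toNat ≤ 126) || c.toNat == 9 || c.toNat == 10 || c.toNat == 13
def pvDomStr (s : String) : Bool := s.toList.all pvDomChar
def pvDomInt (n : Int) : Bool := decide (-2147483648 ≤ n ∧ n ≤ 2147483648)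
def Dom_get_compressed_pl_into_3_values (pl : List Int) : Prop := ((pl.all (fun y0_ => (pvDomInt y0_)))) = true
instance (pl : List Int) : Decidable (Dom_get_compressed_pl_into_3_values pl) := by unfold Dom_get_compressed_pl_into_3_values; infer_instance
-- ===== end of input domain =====

-- B replaces A's nested row-reconstruction loop with one flat pass that classifies
-- each index by a running triangular counter into two bucket lists (objective: simpler).

-- ===== PORT A =====
-- inner 'for i in range(len(cur_compressed_pl))' body; cur[i] / compressed[...] are
-- always in range when this branch is reached in A, so getD 0 is exact here
def pvABody (cur : List Int) (comp : List Int) (i : Nat) : List Int :=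
  if comp.length ≤ i + 1 ∧ i ≤ 1 then comp ++ [cur.getD i 0]
  else comp.set (min (i + 1) 2) (min (comp.getD (min (i + 1) 2) 0) (cur.getD i 0))

def pvAIter (cur comp : List Int) : List Int :=
  (List.range cur.length).foldl (pvABody cur) comp

-- the 'while sum_n < len(pl)' loop
def pvALoop (pl : List Int) (comp : List Int) (n sum_n : Nat) : List Int :=
  if _h : sum_n < pl.length then
    pvALoop pl
      (pvAIter (PySem.List.slice pl (some (sum_n : Int)) (some ((sum_n + n + 1 : Nat) : Int))) comp)
      (n + 1) (sum_n + n + 1)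
  else comp
termination_by pl.length - sum_n
decreasing_by omega

def get_compressed_pl_into_3_values (pl : List Int) : List Int :=
  if pl.length == 3 then pl
  else pvALoop pl [] 0 0

-- ===== PORT B =====
-- loop body of B's single 'for i in range(1, len(pl))'; pl[i] is always in range here
def pvBStep (pl : List Int) (s : List Int × List Int × Int × Int) (i : Int) :
    List Int × List Int × Int × Int :=
  match s with
  | (p1, p2, tri, step) =>
    if i == tri then (p1 ++ [PySem.List.pyGetD pl i 0], p2, tri + step, step + 1)
    else (p1, p2 ++ [PySem.List.pyGetD pl i 0], tri, step)

def get_compressed_pl_into_3_values_alt (pl : List Int) : List Int :=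
  match pl with
  | [] => []
  | p0 :: _ =>
    let st := (PySem.List.pyRange 1 (pl.length : Int) 1).foldl (pvBStep pl) ([], [], 1, 2)
    [p0]
      ++ (match PySem.List.min? st.1 (fun x => x) with | some m => [m] | none => [])
      ++ (match PySem.List.min? st.2.1 (fun x => x) with | some m => [m] | none => [])

-- ===== PRECONDITION & SPEC =====
def Spec_get_compressed_pl_into_3_values (pl : List Int) (out : List Int) : Prop := out = get_compressed_pl_into_3_values_alt pl
instance (pl : List Int) (out : List Int) : Decidable (Spec_get_compressed_pl_into_3_values pl out) := by unfold Spec_get_compressed_pl_into_3_values; infer_instance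

-- ===== CLAIM (what is proved, stated in full; the proofs are below) =====
def Claim_equal_get_compressed_pl_into_3_values : Prop := ∀ (pl : List Int), Dom_get_compressed_pl_into_3_values pl → Spec_get_compressed_pl_into_3_values pl (get_compressed_pl_into_3_values pl)

-- ===== LEMMAS AND PROOFS =====

-- triangular rows of the tail of pl: chunks of sizes m+2, m+3, …
def pvChunks (m : Nat) (xs : List Int) : List (List Int) :=
  match xs with
  | [] => []
  | x :: t => (x :: t.take (m + 1)) :: pvChunks (m + 1) (t.drop (m + 1))
termination_by xs.length
decreasing_by simp

def pvHeads (cs : List (List Int)) : List Int := cs.filterMap List.head?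
def pvTails (cs : List (List Int)) : List Int := cs.flatMap List.tail

-- common reference value of both programs
def pvOut : List Int → List Int
  | [] => []
  | p0 :: rest =>
    [p0]
      ++ (match pvHeads (pvChunks 0 rest) with
          | [] => []
          | y :: hs => [hs.foldl min y])
      ++ (match pvTails (pvChunks 0 rest) with
          | [] => []
          | z :: ts => [ts.foldl min z])

theorem pvChunks_nil (m : Nat) : pvChunks m [] = [] := by rw [pvChunks.eq_def]

theorem pvChunks_cons (m : Nat) (x : Int) (t : List Int) :
    pvChunks m (x :: t) = (x :: t.take (m + 1)) :: pvChunks (m + 1) (t.drop (m + 1)) := by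
  rw [pvChunks.eq_def]

theorem pvHeads_cons (x : Int) (l : List Int) (cs : List (List Int)) :
    pvHeads ((x :: l) :: cs) = x :: pvHeads cs := by simp [pvHeads]

theorem pvTails_cons (x : Int) (l : List Int) (cs : List (List Int)) :
    pvTails ((x :: l) :: cs) = l ++ pvTails cs := by simp [pvTails]

theorem pv_get_of_drop {pl ys : List Int} {k : Nat} {y : Int}
    (h : pl.drop k = y :: ys) : pl[k]?.getD 0 = y := by
  have h1 : pl[k]? = some y := by
    rw [← Nat.add_zero k, ← List.getElem?_drop, h]; rfl
  simp [h1]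

theorem pv_drop_succ_of_drop {pl ys : List Int} {k : Nat} {y : Int}
    (h : pl.drop k = y :: ys) : pl.drop (k + 1) = ys := by
  have h2 : List.drop 1 (List.drop k pl) = List.drop (k + 1) pl :=
    List.drop_drop (i := 1) (j := k) (l := pl)
  rw [← h2, h]; rfl

-- A's inner loop from a full 3-slot state, indices ≥ 1: a running min on slot 2
theorem pvA_inner_tail (cur : List Int) :
    ∀ (ys : List Int) (k : Nat), 1 ≤ k → cur.drop k = ys → ∀ (a b c : Int),
      (List.range' k ys.length).foldl (pvABody cur) [a, b, c] = [a, b, ys.foldl min c] := by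
  intro ys
  induction ys with
  | nil => intro k _ _ a b c; simp
  | cons y t ih =>
    intro k hk hdrop a b c
    rw [List.length_cons, List.range'_succ, List.foldl_cons]
    have hmin : min (k + 1) 2 = 2 := by omega
    have hbody : pvABody cur [a, b, c] k = [a, b, min c y] := by
      simp only [pvABody]
      rw [if_neg (by simp; omega)]
      simp [hmin, List.getD, pv_get_of_drop hdrop]
    rw [hbody, ih (k + 1) (by omega) (pv_drop_succ_of_drop hdrop) a b (min c y)]
    simp

-- A's inner loop over a whole row from state [a,b,c]
theorem pvA_iter_full (y : Int) (ys : List Int) (a b c : Int) :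
    pvAIter (y :: ys) [a, b, c] = [a, min b y, ys.foldl min c] := by
  unfold pvAIter
  rw [List.length_cons, List.range_eq_range', List.range'_succ, List.foldl_cons]
  have hbody : pvABody (y :: ys) [a, b, c] 0 = [a, min b y, c] := by
    simp [pvABody, List.getD]
  rw [hbody, pvA_inner_tail (y :: ys) ys 1 (by omega) (by simp) a (min b y) c]

-- A's inner loop over the very first row [p0] from the empty state
theorem pvA_iter_first (y : Int) : pvAIter [y] [] = [y] := by
  simp [pvAIter, pvABody, List.range_succ, List.getD]

-- A's inner loop over a row from state [a]
theorem pvA_iter_one_nil (y a : Int) : pvAIter [y] [a] = [a, y] := by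
  simp [pvAIter, pvABody, List.range_succ, List.getD]

theorem pvA_iter_one_cons (y z : Int) (t : List Int) (a : Int) :
    pvAIter (y :: z :: t) [a] = [a, y, t.foldl min z] := by
  unfold pvAIter
  rw [List.length_cons, List.length_cons, List.range_eq_range', List.range'_succ,
    List.range'_succ, List.foldl_cons, List.foldl_cons]
  have h0 : pvABody (y :: z :: t) [a] 0 = [a, y] := by simp [pvABody, List.getD]
  have h1 : pvABody (y :: z :: t) [a, y] 1 = [a, y, z] := by simp [pvABody, List.getD]
  rw [h0, h1, pvA_inner_tail (y :: z :: t) t 2 (by omega) (by simp) a y z]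

-- A's outer while loop from a full 3-slot state, fuel-indexed induction
theorem pvA_loop_full (pl : List Int) :
    ∀ (N : Nat) (xs : List Int) (m sum_n : Nat) (a b c : Int), xs.length ≤ N →
      pl.drop sum_n = xs →
      pvALoop pl [a, b, c] (m + 1) sum_n =
        [a, (pvHeads (pvChunks m xs)).foldl min b, (pvTails (pvChunks m xs)).foldl min c] := by
  intro N
  induction N with
  | zero =>
    intro xs m sum_n a b c hN hdrop
    have hxs : xs = [] := List.eq_nil_of_length_eq_zero (by omega)
    subst hxs
    have hge : pl.length ≤ sum_n := by
      have := List.drop_eq_nil_iff.mp hdrop; omega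
    rw [pvALoop, dif_neg (by omega)]
    simp [pvChunks_nil, pvHeads, pvTails]
  | succ N ih =>
    intro xs m sum_n a b c hN hdrop
    cases xs with
    | nil =>
      have hge : pl.length ≤ sum_n := by
        have := List.drop_eq_nil_iff.mp hdrop; omega
      rw [pvALoop, dif_neg (by omega)]
      simp [pvChunks_nil, pvHeads, pvTails]
    | cons x t =>
      have hlt : sum_n < pl.length := by
        by_contra hc
        rw [List.drop_eq_nil_iff.mpr (by omega)] at hdrop
        simp at hdrop
      rw [pvALoop, dif_pos hlt]
      have hslice : PySem.List.slice pl (some (sum_n : Int)) (some ((sum_n + (m + 1) + 1 : Nat) : Int))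
          = x :: t.take (m + 1) := by
        rw [PySem.List.slice_natCast, hdrop]
        have : sum_n + (m + 1) + 1 - sum_n = m + 2 := by omega
        rw [this]
        simp
      rw [hslice, pvA_iter_full]
      have hdrop' : pl.drop (sum_n + (m + 1) + 1) = t.drop (m + 1) := by
        have h2 : List.drop (m + 2) (List.drop sum_n pl) = List.drop (sum_n + (m + 2)) pl :=
          List.drop_drop (i := m + 2) (j := sum_n) (l := pl)
        have h3 : sum_n + (m + 1) + 1 = sum_n + (m + 2) := by omega
        rw [h3, ← h2, hdrop]
        simp
      have hlen' : (t.drop (m + 1)).length ≤ N := by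
        simp at hN ⊢; omega
      rw [ih (t.drop (m + 1)) (m + 1) (sum_n + (m + 1) + 1) a (min b x)
        ((t.take (m + 1)).foldl min c) hlen' hdrop']
      rw [pvChunks_cons, pvHeads_cons, pvTails_cons]
      rw [List.foldl_cons, List.foldl_append]

-- B's inner run of indices that never hit the triangular counter
theorem pvB_inner (pl : List Int) :
    ∀ (n j : Nat) (p1 p2 : List Int) (tri st : Int), j + n ≤ pl.length →
      (∀ i : Int, (j : Int) ≤ i → i < (j : Int) + (n : Int) → i ≠ tri) →
      (PySem.List.pyRange (j : Int) ((j : Int) + (n : Int)) 1).foldl (pvBStep pl) (p1, p2, tri, st) =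
        (p1, p2 ++ (pl.drop j).take n, tri, st) := by
  intro n
  induction n with
  | zero =>
    intro j p1 p2 tri st _ _
    rw [PySem.List.pyRange_one_eq_nil (by omega)]
    simp
  | succ n ih =>
    intro j p1 p2 tri st hlen hne
    rw [PySem.List.pyRange_one_cons (by push_cast; omega), List.foldl_cons]
    have hjne : ((j : Int) == tri) = false := by
      simp only [beq_eq_false_iff_ne, ne_eq]
      exact hne (j : Int) le_rfl (by push_cast; omega)
    have hstep : pvBStep pl (p1, p2, tri, st) (j : Int) =
        (p1, p2 ++ [pl.getD j 0], tri, st) := by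
      simp [pvBStep, hjne]
    rw [hstep]
    have hj : j < pl.length := by omega
    have hcast : ((j : Int) + 1) = ((j + 1 : Nat) : Int) := by push_cast; ring
    have hcast2 : (j : Int) + ((n : Nat) + 1 : Nat) = ((j + 1 : Nat) : Int) + (n : Int) := by
      push_cast; ring
    rw [hcast2, hcast, ih (j + 1) p1 (p2 ++ [pl.getD j 0]) tri st (by omega)
      (by intro i h1 h2
          apply hne i (by push_cast at h1 ⊢; omega) (by push_cast at h2 ⊢; omega))]
    have htake : List.take (n + 1) (List.drop j pl) =
        pl.getD j 0 :: List.take n (List.drop (j + 1) pl) := by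
      rw [List.drop_eq_getElem_cons hj, List.take_succ_cons, List.getD_eq_getElem pl 0 hj]
    rw [htake]
    simp

-- B's main fold over the flat index range, chunk by chunk (fuel-indexed)
theorem pvB_main (pl : List Int) :
    ∀ (N : Nat) (xs : List Int) (m k : Nat) (p1 p2 : List Int), xs.length ≤ N →
      pl.drop k = xs →
      ∃ t s, (PySem.List.pyRange (k : Int) (pl.length : Int) 1).foldl (pvBStep pl)
          (p1, p2, (k : Int), (m : Int) + 2) =
        (p1 ++ pvHeads (pvChunks m xs), p2 ++ pvTails (pvChunks m xs), t, s) := by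
  intro N
  induction N with
  | zero =>
    intro xs m k p1 p2 hN hdrop
    have hxs : xs = [] := List.eq_nil_of_length_eq_zero (by omega)
    subst hxs
    have hge : pl.length ≤ k := by
      have := List.drop_eq_nil_iff.mp hdrop; omega
    refine ⟨(k : Int), (m : Int) + 2, ?_⟩
    rw [PySem.List.pyRange_one_eq_nil (by omega)]
    simp [pvChunks_nil, pvHeads, pvTails]
  | succ N ih =>
    intro xs m k p1 p2 hN hdrop
    cases xs with
    | nil =>
      have hge : pl.length ≤ k := by
        have := List.drop_eq_nil_iff.mp hdrop; omega
      refine ⟨(k : Int), (m : Int) + 2, ?_⟩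
      rw [PySem.List.pyRange_one_eq_nil (by omega)]
      simp [pvChunks_nil, pvHeads, pvTails]
    | cons x t =>
      have hlt : k < pl.length := by
        by_contra hc
        rw [List.drop_eq_nil_iff.mpr (by omega)] at hdrop
        simp at hdrop
      have hxlen : t.length + 1 = pl.length - k := by
        have := congrArg List.length hdrop
        simp at this; omega
      have hdropt : pl.drop (k + 1) = t := pv_drop_succ_of_drop hdrop
      have hgetx : pl.getD k 0 = x := by
        rw [List.getD_eq_getElem?_getD]; exact pv_get_of_drop hdrop
      by_cases hle : t.length + 1 ≤ m + 2
      · -- last (possibly partial) chunk: the whole remaining range stays below tri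
        refine ⟨(k : Int) + ((m : Int) + 2), (m : Int) + 2 + 1, ?_⟩
        rw [PySem.List.pyRange_one_cons (by omega), List.foldl_cons]
        have hstep : pvBStep pl (p1, p2, (k : Int), (m : Int) + 2) (k : Int) =
            (p1 ++ [x], p2, (k : Int) + ((m : Int) + 2), (m : Int) + 2 + 1) := by
          simp [pvBStep, pv_get_of_drop hdrop]
        rw [hstep]
        have hcast : (pl.length : Int) = ((k + 1 : Nat) : Int) + (t.length : Int) := by
          push_cast; omega
        have hcast1 : ((k : Int) + 1) = ((k + 1 : Nat) : Int) := by push_cast; ring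
        rw [hcast, hcast1, pvB_inner pl t.length (k + 1) (p1 ++ [x]) p2 _ _ (by omega)
          (by intro i h1 h2; push_cast at h1 h2 ⊢; omega)]
        rw [hdropt, List.take_length]
        rw [pvChunks_cons, List.take_of_length_le (by omega),
          List.drop_eq_nil_of_le (by omega), pvChunks_nil, pvHeads_cons, pvTails_cons]
        simp [pvHeads, pvTails]
      · -- a full chunk of size m+2, then recurse
        have hsplit : PySem.List.pyRange (k : Int) (pl.length : Int) 1 =
            PySem.List.pyRange (k : Int) ((k + m + 2 : Nat) : Int) 1 ++
            PySem.List.pyRange ((k + m + 2 : Nat) : Int) (pl.length : Int) 1 :=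
          PySem.List.pyRange_one_append _ _ _ (by push_cast; omega) (by push_cast; omega)
        rw [hsplit, List.foldl_append]
        rw [PySem.List.pyRange_one_cons (by push_cast; omega), List.foldl_cons]
        have hstep : pvBStep pl (p1, p2, (k : Int), (m : Int) + 2) (k : Int) =
            (p1 ++ [x], p2, (k : Int) + ((m : Int) + 2), (m : Int) + 2 + 1) := by
          simp [pvBStep, pv_get_of_drop hdrop]
        rw [hstep]
        have hcast1 : ((k : Int) + 1) = ((k + 1 : Nat) : Int) := by push_cast; ring
        have hcast2 : ((k + m + 2 : Nat) : Int) = ((k + 1 : Nat) : Int) + ((m + 1 : Nat) : Int) := by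
          push_cast; ring
        rw [hcast1, hcast2, pvB_inner pl (m + 1) (k + 1) (p1 ++ [x]) p2 _ _ (by omega)
          (by intro i h1 h2; push_cast at h1 h2 ⊢; omega)]
        rw [hdropt, ← hcast2]
        have hdrop2 : pl.drop (k + m + 2) = t.drop (m + 1) := by
          have h2 : List.drop (m + 1) (List.drop (k + 1) pl) = List.drop (k + 1 + (m + 1)) pl :=
            List.drop_drop (i := m + 1) (j := k + 1) (l := pl)
          have h3 : k + 1 + (m + 1) = k + m + 2 := by omega
          rw [h3] at h2
          rw [← h2, hdropt]
        have hlen2 : (t.drop (m + 1)).length ≤ N := by simp at hN ⊢; omega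
        obtain ⟨tf, sf, hF⟩ := ih (t.drop (m + 1)) (m + 1) (k + m + 2) (p1 ++ [x])
          (p2 ++ t.take (m + 1)) hlen2 hdrop2
        have hcast3 : (k : Int) + ((m : Int) + 2) = ((k + m + 2 : Nat) : Int) := by push_cast; ring
        have hcast4 : (m : Int) + 2 + 1 = ((m + 1 : Nat) : Int) + 2 := by push_cast; ring
        rw [hcast3, hcast4, hF]
        refine ⟨tf, sf, ?_⟩
        rw [pvChunks_cons, pvHeads_cons, pvTails_cons]
        simp

-- B equals the reference value
theorem pvB_char (pl : List Int) : get_compressed_pl_into_3_values_alt pl = pvOut pl := by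
  cases pl with
  | nil => rfl
  | cons p0 rest =>
    obtain ⟨tf, sf, hF⟩ := pvB_main (p0 :: rest) rest.length rest 0 1 [] [] le_rfl (by simp)
    simp only [Nat.cast_one, Nat.cast_zero, zero_add] at hF
    simp only [get_compressed_pl_into_3_values_alt, pvOut, hF]
    simp only [List.nil_append]
    cases hH : pvHeads (pvChunks 0 rest) with
    | nil =>
      cases hT : pvTails (pvChunks 0 rest) with
      | nil => simp [PySem.List.min?]
      | cons z ts =>
        rw [PySem.List.min?_id_cons]
        simp [PySem.List.min?]
    | cons y hs =>
      cases hT : pvTails (pvChunks 0 rest) with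
      | nil =>
        rw [PySem.List.min?_id_cons]
        simp [PySem.List.min?]
      | cons z ts =>
        rw [PySem.List.min?_id_cons, PySem.List.min?_id_cons]

-- A equals the reference value
theorem pvA_char (pl : List Int) : get_compressed_pl_into_3_values pl = pvOut pl := by
  cases pl with
  | nil =>
    rw [get_compressed_pl_into_3_values, if_neg (by simp), pvALoop, dif_neg (by simp)]
    rfl
  | cons p0 rest =>
    cases rest with
    | nil =>
      rw [get_compressed_pl_into_3_values, if_neg (by simp), pvALoop, dif_pos (by simp)]
      have hslice : PySem.List.slice [p0] (some ((0 : Nat) : Int)) (some ((0 + 0 + 1 : Nat) : Int)) = [p0] := by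
        rw [PySem.List.slice_natCast]; simp
      rw [hslice, pvA_iter_first, pvALoop, dif_neg (by simp)]
      simp [pvOut, pvChunks_nil, pvHeads, pvTails]
    | cons y t =>
      have hfirst : ∀ (tl : List Int), pvALoop (p0 :: y :: tl) [] 0 0 =
          pvALoop (p0 :: y :: tl) [p0] 1 1 := by
        intro tl
        rw [pvALoop, dif_pos (by simp)]
        have hslice : PySem.List.slice (p0 :: y :: tl) (some ((0 : Nat) : Int))
            (some ((0 + 0 + 1 : Nat) : Int)) = [p0] := by
          rw [PySem.List.slice_natCast]; simp
        rw [hslice, pvA_iter_first]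
      by_cases h3 : (p0 :: y :: t).length = 3
      · -- early return: a 3-element list is already [p0] ++ [min of {y}] ++ [min of {z}]
        cases t with
        | nil => simp at h3
        | cons z t' =>
          simp at h3
          subst h3
          rw [get_compressed_pl_into_3_values, if_pos (by simp)]
          simp only [pvOut]
          rw [pvChunks_cons]
          simp only [List.take, List.drop]
          rw [pvChunks_nil, pvHeads_cons, pvTails_cons]
          simp [pvHeads, pvTails]
      · rw [get_compressed_pl_into_3_values, if_neg (by simpa using h3), hfirst]
        rw [pvALoop, dif_pos (by simp)]
        have hslice : PySem.List.slice (p0 :: y :: t) (some ((1 : Nat) : Int))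
            (some ((1 + 1 + 1 : Nat) : Int)) = y :: t.take 1 := by
          rw [PySem.List.slice_natCast]; simp
        rw [hslice]
        cases t with
        | nil =>
          simp only [List.take_nil]
          rw [pvA_iter_one_nil, pvALoop, dif_neg (by simp)]
          simp only [pvOut]
          rw [pvChunks_cons]
          simp only [List.take, List.drop]
          rw [pvChunks_nil, pvHeads_cons, pvTails_cons]
          simp [pvHeads, pvTails]
        | cons z t' =>
          simp only [List.take]
          rw [pvA_iter_one_cons]
          rw [pvA_loop_full (p0 :: y :: z :: t') t'.length t' 1 3 p0 y ([].foldl min z)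
            le_rfl (by simp)]
          simp only [pvOut]
          rw [pvChunks_cons]
          simp only [List.take, List.drop]
          rw [pvHeads_cons, pvTails_cons]
          simp

-- ===== VERDICT (by name: the statement is the Claim_ definition above) =====
theorem get_compressed_pl_into_3_values_spec : Claim_equal_get_compressed_pl_into_3_values := by
  intro pl _
  unfold Spec_get_compressed_pl_into_3_values
  rw [pvA_char, pvB_char]
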